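-- pv_equiv track=rewrite | github.com/Afrazsajid/atsresumeeeeee | newestzohoparser.py | summary
-- ===== SOURCE A (Python) =====
-- from typing import Dict, List, Optional, Tuple, Any
--
-- def summary(text: str, keywords: List[str], max_words: int = 160) -> str:
--     lines = [ln.strip() for ln in text.split("\n") if ln.strip()]
--     scored = []
--     top_kw = set([k.lower() for k in keywords[:18]])
--     for ln in lines[:120]:
--         if len(ln.split()) < 6:
--             continue
--         score = sum(1 for k in top_kw if k in ln.lower())
--         if score > 0:
--             scored.append((ln, score))
--     scored.sort(key=lambda x: x[1], reverse=True)
--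
--     out = []
--     wc = 0
--     for ln, _ in scored[:6]:
--         n = len(ln.split())
--         if wc + n > max_words:
--             continue
--         out.append(ln)
--         wc += n
--     if out:
--         return " ".join(out)
--     return " ".join(text.split()[:max_words])
-- ===== SOURCE B (Python) =====
-- from typing import List
--
-- def summary(text: str, keywords: List[str], max_words: int = 160) -> str:
--     # Single streaming pass: strip/filter/cap/score fused into one loop that files
--     # each scoring line into a score->lines bucket dict; selection walks scores
--     # 18..1 (scores are bounded by the 18 keywords) with a fused take-6/word-budget
--     # loop, so no sorted array and no intermediate scored list is ever built.
--     kws = set()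
--     for k in keywords[:18]:
--         kws.add(k.lower())
--     buckets = {}
--     seen = 0
--     for raw in text.split("\n"):
--         if seen >= 120:
--             break
--         ln = raw.strip()
--         if not ln:
--             continue
--         seen += 1
--         if len(ln.split()) < 6:
--             continue
--         low = ln.lower()
--         score = 0
--         for k in kws:
--             if k in low:
--                 score += 1
--         if score > 0:
--             buckets[score] = buckets.get(score, []) + [ln]
--     out = []
--     wc = 0
--     taken = 0
--     for s in range(18, 0, -1):
--         for ln in buckets.get(s, []):
--             if taken < 6:
--                 taken += 1
--                 n = len(ln.split())
--                 if wc + n <= max_words: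
--                     out.append(ln)
--                     wc += n
--     if out:
--         return " ".join(out)
--     return " ".join(text.split()[:max_words])
-- ===== Notes on version B (the rewrite author's own statement) =====
-- stated objective: alternative
-- what changed: B fuses strip/filter/first-120/scoring into one streaming pass that files lines into a dict of score buckets (scores bounded by 18), then selects by walking scores 18..1 with a fused take-6 plus word-budget loop, replacing A's staged list comprehension, full stable sort, slice and separate budget loop.
import Mathlib
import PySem

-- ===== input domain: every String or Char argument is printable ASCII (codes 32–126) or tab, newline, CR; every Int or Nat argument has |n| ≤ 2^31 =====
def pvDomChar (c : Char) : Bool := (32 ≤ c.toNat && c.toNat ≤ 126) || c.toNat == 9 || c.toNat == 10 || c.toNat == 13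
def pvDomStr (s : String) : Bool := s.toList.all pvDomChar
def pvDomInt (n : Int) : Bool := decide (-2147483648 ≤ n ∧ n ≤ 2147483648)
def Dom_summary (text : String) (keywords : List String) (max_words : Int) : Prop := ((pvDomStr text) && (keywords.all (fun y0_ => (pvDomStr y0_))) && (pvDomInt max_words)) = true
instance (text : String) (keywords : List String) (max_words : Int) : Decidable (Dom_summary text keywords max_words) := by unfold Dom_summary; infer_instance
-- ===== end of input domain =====

-- B fuses strip/filter/first-120/scoring into one streaming pass that files lines into
-- a dict of score buckets, then selects by walking scores 18..1 with a fused
-- take-6/word-budget loop (objective: alternative — no sort, no staged lists).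

-- ===== PORT A =====
def summary (text : String) (keywords : List String) (max_words : Int) : String :=
  -- text.split("\n"): split? is none only for sep = "", impossible here
  let lines := (((PySem.Str.split? text "\n").getD []).filter
      (fun ln => PySem.Str.strip ln != "")).map (fun ln => PySem.Str.strip ln)
  let top_kw : List String := PySem.Set.ofList
      ((PySem.List.slice keywords none (some 18)).map (fun k => PySem.Str.lower k))
  let scored : List (String × Int) :=
    (PySem.List.slice lines none (some 120)).foldl (fun scored ln =>
      if (PySem.Str.split₀ ln).length < 6 then scored
      else
        let score : Int := (top_kw.map (fun k =>
            if PySem.Str.isIn k (PySem.Str.lower ln) then (1 : Int) else 0)).sum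
        if score > 0 then scored ++ [(ln, score)] else scored) []
  let scored := PySem.List.sorted scored (fun p => p.2) true
  let res := (PySem.List.slice scored none (some 6)).foldl
      (fun (s : List String × Int) p =>
        let n : Int := ((PySem.Str.split₀ p.1).length : Int)
        if s.2 + n > max_words then s else (s.1 ++ [p.1], s.2 + n)) ([], 0)
  if res.1 ≠ [] then PySem.Str.join " " res.1
  else PySem.Str.join " " (PySem.List.slice (PySem.Str.split₀ text) none (some max_words))

-- ===== PORT B =====
def summary_alt (text : String) (keywords : List String) (max_words : Int) : String :=
  -- for k in keywords[:18]: kws.add(k.lower())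
  let kws : List String := (PySem.List.slice keywords none (some 18)).foldl
      (fun s k => PySem.Set.add s (PySem.Str.lower k)) []
  -- one streaming pass over text.split("\n"); 'break' at seen >= 120 is a skip guard
  -- (the remaining iterations would not change the state)
  let st := ((PySem.Str.split? text "\n").getD []).foldl
      (fun (st : Int × PySem.Dict Int (List String)) raw =>
        if 120 ≤ st.1 then st
        else
          let ln := PySem.Str.strip raw
          if ln == "" then st
          else if (PySem.Str.split₀ ln).length < 6 then (st.1 + 1, st.2)
          else
            let low := PySem.Str.lower ln
            let score : Int := kws.foldl
                (fun sc k => if PySem.Str.isIn k low then sc + 1 else sc) 0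
            if score > 0 then
              (st.1 + 1, st.2.modify score [] (fun l => l ++ [ln]))
            else (st.1 + 1, st.2)) ((0 : Int), PySem.Dict.empty)
  let buckets := st.2
  -- fused selection: walk scores 18..1; take up to 6 lines, word-budget them inline
  let res := (PySem.List.pyRange 18 0 (-1)).foldl
      (fun (st : List String × Int × Int) s =>
        (buckets.getD s []).foldl (fun (st : List String × Int × Int) ln =>
          if st.2.2 < 6 then
            let taken := st.2.2 + 1
            let n : Int := ((PySem.Str.split₀ ln).length : Int)
            if st.2.1 + n ≤ max_words then (st.1 ++ [ln], st.2.1 + n, taken)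
            else (st.1, st.2.1, taken)
          else st) st) (([] : List String), (0 : Int), (0 : Int))
  if res.1 ≠ [] then PySem.Str.join " " res.1
  else PySem.Str.join " " (PySem.List.slice (PySem.Str.split₀ text) none (some max_words))

-- ===== PRECONDITION & SPEC =====
def Spec_summary (text : String) (keywords : List String) (max_words : Int) (out : String) : Prop := out = summary_alt text keywords max_words
instance (text : String) (keywords : List String) (max_words : Int) (out : String) : Decidable (Spec_summary text keywords max_words out) := by unfold Spec_summary; infer_instance

-- ===== CLAIM (what is proved, stated in full; the proofs are below) =====
def Claim_equal_summary : Prop := ∀ (text : String) (keywords : List String) (max_words : Int), Dom_summary text keywords max_words → Spec_summary text keywords max_words (summary text keywords max_words)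

-- ===== LEMMAS AND PROOFS =====

-- abstract loop bodies (each definitionally equal to the corresponding port lambda)
def pvScoreA (tk : List String) (ln : String) : Int :=
  (tk.map (fun k => if PySem.Str.isIn k (PySem.Str.lower ln) then (1 : Int) else 0)).sum

def pvScoreB (tk : List String) (ln : String) : Int :=
  tk.foldl (fun sc k => if PySem.Str.isIn k (PySem.Str.lower ln) then sc + 1 else sc) 0

def pvStepA (f : String → Int) (acc : List (String × Int)) (ln : String) : List (String × Int) :=
  if (PySem.Str.split₀ ln).length < 6 then acc
  else if f ln > 0 then acc ++ [(ln, f ln)] else acc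

def pvStepD (f : String → Int) (d : PySem.Dict Int (List String)) (ln : String) :
    PySem.Dict Int (List String) :=
  if (PySem.Str.split₀ ln).length < 6 then d
  else if f ln > 0 then d.modify (f ln) [] (fun l => l ++ [ln]) else d

def pvStepB (f : String → Int) (st : Int × PySem.Dict Int (List String)) (raw : String) :
    Int × PySem.Dict Int (List String) :=
  if 120 ≤ st.1 then st
  else
    let ln := PySem.Str.strip raw
    if ln == "" then st
    else if (PySem.Str.split₀ ln).length < 6 then (st.1 + 1, st.2)
    else if f ln > 0 then (st.1 + 1, st.2.modify (f ln) [] (fun l => l ++ [ln]))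
    else (st.1 + 1, st.2)

def pvBudget (mw : Int) (s : List String × Int) (ln : String) : List String × Int :=
  let n : Int := ((PySem.Str.split₀ ln).length : Int)
  if s.2 + n > mw then s else (s.1 ++ [ln], s.2 + n)

def pvSel (mw : Int) (st : List String × Int × Int) (ln : String) : List String × Int × Int :=
  if st.2.2 < 6 then
    let taken := st.2.2 + 1
    let n : Int := ((PySem.Str.split₀ ln).length : Int)
    if st.2.1 + n ≤ mw then (st.1 ++ [ln], st.2.1 + n, taken)
    else (st.1, st.2.1, taken)
  else st

-- B's set-building loop is set(k.lower() for k in …)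
theorem kws_eq (l : List String) :
    l.foldl (fun s k => PySem.Set.add s (PySem.Str.lower k)) [] =
      PySem.Set.ofList (l.map (fun k => PySem.Str.lower k)) := by
  rw [PySem.Set.ofList_eq_foldl, List.foldl_map]

-- B's counting loop computes A's 0/1-sum
theorem score_eq (tk : List String) (ln : String) : pvScoreB tk ln = pvScoreA tk ln := by
  unfold pvScoreB pvScoreA
  have h : (fun (sc : Int) k => if PySem.Str.isIn k (PySem.Str.lower ln) then sc + 1 else sc)
      = fun (sc : Int) k => sc + (if PySem.Str.isIn k (PySem.Str.lower ln) then (1 : Int) else 0) := by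
    funext sc k; split_ifs <;> simp
  rw [h, PySem.List.foldl_add]
  simp

-- the streaming pass equals: strip+filter, take 120, then the per-line dict step
theorem fuse (f : String → Int) (raws : List String) : ∀ (seen : Int)
    (d : PySem.Dict Int (List String)), 0 ≤ seen →
    (raws.foldl (pvStepB f) (seen, d)).2 =
      (((raws.filter (fun ln => PySem.Str.strip ln != "")).map
          (fun ln => PySem.Str.strip ln)).take (120 - seen).toNat).foldl (pvStepD f) d := by
  induction raws with
  | nil => intro seen d _; simp
  | cons raw t ih =>
    intro seen d h0
    by_cases he : (PySem.Str.strip raw == "") = true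
    · have hstep : pvStepB f (seen, d) raw = (seen, d) := by
        unfold pvStepB
        split_ifs <;> simp_all
      have hfe : (PySem.Str.strip raw != "") = false := by simp_all [bne]
      rw [List.foldl_cons, hstep, List.filter_cons, hfe]
      exact ih seen d h0
    · have hfe : (PySem.Str.strip raw != "") = true := by simp_all [bne]
      by_cases h120 : (120 : Int) ≤ seen
      · have hstep : pvStepB f (seen, d) raw = (seen, d) := by
          unfold pvStepB; rw [if_pos h120]
        have ht0 : (120 - seen).toNat = 0 := by omega
        rw [List.foldl_cons, hstep, ih seen d h0, ht0, List.filter_cons, hfe]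
        simp
      · have hstep : pvStepB f (seen, d) raw =
            (seen + 1, pvStepD f d (PySem.Str.strip raw)) := by
          unfold pvStepB pvStepD
          rw [if_neg h120, if_neg (by simp_all)]
          split_ifs <;> rfl
        have ht : (120 - seen).toNat = (120 - (seen + 1)).toNat + 1 := by omega
        rw [List.foldl_cons, hstep, ih (seen + 1) _ (by omega), List.filter_cons, hfe]
        rw [if_pos rfl, List.map_cons, ht, List.take_succ_cons, List.foldl_cons]

-- the dict built by the streaming pass holds exactly A's scored lines, per bucket
theorem dict_char (f : String → Int) (lines : List String) :
    ∀ (d : PySem.Dict Int (List String)) (acc : List (String × Int)),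
    (∀ s : Int, d.getD s [] = (acc.filter (fun p => p.2 == s)).map (fun p => p.1)) →
    ∀ s : Int, (lines.foldl (pvStepD f) d).getD s [] =
      ((lines.foldl (pvStepA f) acc).filter (fun p => p.2 == s)).map (fun p => p.1) := by
  induction lines with
  | nil => intro d acc h s; simpa using h s
  | cons ln t ih =>
    intro d acc h s
    rw [List.foldl_cons, List.foldl_cons]
    refine ih _ _ ?_ s
    intro s'
    unfold pvStepD pvStepA
    by_cases h6 : (PySem.Str.split₀ ln).length < 6
    · rw [if_pos h6, if_pos h6]; exact h s'
    · rw [if_neg h6, if_neg h6]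
      by_cases hp : f ln > 0
      · rw [if_pos hp, if_pos hp, PySem.Dict.getD_modify]
        by_cases hs : s' = f ln
        · subst hs
          rw [if_pos rfl, h (f ln)]
          simp [List.filter_append]
        · rw [if_neg hs, h s']
          have hne : (f ln == s') = false := by
            simp only [beq_eq_false_iff_ne]; exact fun h' => hs h'.symm
          simp [List.filter_append, hne]
      · rw [if_neg hp, if_neg hp]; exact h s'

-- a fold nested inside a fold over buckets is a fold over the concatenation
theorem outer_flatten {σ : Type} (S : List Int) (g : Int → List String)
    (inner : σ → String → σ) (init : σ) :
    S.foldl (fun st s => (g s).foldl inner st) init = (S.flatMap g).foldl inner init := by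
  induction S generalizing init with
  | nil => simp
  | cons s S ih => simp only [List.foldl_cons, List.flatMap_cons, List.foldl_append, ih]

-- B's fused take-6/budget loop = take (6 - taken) then A's budget loop
theorem capfuse (mw : Int) (L : List String) : ∀ (out : List String) (wc taken : Int),
    0 ≤ taken →
    L.foldl (pvSel mw) (out, wc, taken) =
      (((L.take (6 - taken).toNat).foldl (pvBudget mw) (out, wc)).1,
       ((L.take (6 - taken).toNat).foldl (pvBudget mw) (out, wc)).2,
       taken + ((min L.length (6 - taken).toNat : Nat) : Int)) := by
  induction L with
  | nil => intro out wc taken _; simp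
  | cons ln t ih =>
    intro out wc taken h0
    rw [List.foldl_cons]
    by_cases h6 : taken < 6
    · have ht : (6 - taken).toNat = (6 - (taken + 1)).toNat + 1 := by omega
      rw [ht, List.take_succ_cons, List.foldl_cons]
      by_cases hb : wc + ((PySem.Str.split₀ ln).length : Int) ≤ mw
      · have hstep : pvSel mw (out, wc, taken) ln =
            (out ++ [ln], wc + ((PySem.Str.split₀ ln).length : Int), taken + 1) := by
          unfold pvSel; rw [if_pos h6, if_pos hb]
        have hbud : pvBudget mw (out, wc) ln =
            (out ++ [ln], wc + ((PySem.Str.split₀ ln).length : Int)) := by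
          unfold pvBudget; rw [if_neg (by omega)]
        rw [hstep, ih _ _ _ (by omega), hbud]
        simp only [Prod.mk.injEq, List.length_cons]
        refine ⟨trivial, trivial, ?_⟩
        push_cast
        omega
      · have hstep : pvSel mw (out, wc, taken) ln = (out, wc, taken + 1) := by
          unfold pvSel; rw [if_pos h6, if_neg hb]
        have hbud : pvBudget mw (out, wc) ln = (out, wc) := by
          unfold pvBudget; rw [if_pos (by omega)]
        rw [hstep, ih _ _ _ (by omega), hbud]
        simp only [Prod.mk.injEq, List.length_cons]
        refine ⟨trivial, trivial, ?_⟩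
        push_cast
        omega
    · have hstep : pvSel mw (out, wc, taken) ln = (out, wc, taken) := by
        unfold pvSel; rw [if_neg h6]
      have ht0 : (6 - taken).toNat = 0 := by omega
      rw [hstep, ih _ _ _ h0, ht0]
      simp

-- insertBy passes over a block whose elements all refuse the test
theorem insertBy_skip {α : Type} (before : α → α → Bool) (x : α) (L1 L2 : List α)
    (h : ∀ y ∈ L1, before x y = false) :
    PySem.List.insertBy before x (L1 ++ L2) = L1 ++ PySem.List.insertBy before x L2 := by
  induction L1 with
  | nil => simp
  | cons a t ih =>
    have ha : before x a = false := h a (by simp)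
    simp [PySem.List.insertBy, ha, ih (fun y hy => h y (by simp [hy]))]

-- insertBy puts x in front of a block whose elements all pass the test
theorem insertBy_front {α : Type} (before : α → α → Bool) (x : α) (L : List α)
    (h : ∀ y ∈ L, before x y = true) :
    PySem.List.insertBy before x L = x :: L := by
  cases L with
  | nil => simp [PySem.List.insertBy]
  | cons a t => simp [PySem.List.insertBy, h a (by simp)]

theorem pv_flatMap_congr {α β : Type} (l : List α) (f g : α → List β)
    (h : ∀ a ∈ l, f a = g a) : l.flatMap f = l.flatMap g := by
  induction l with
  | nil => rfl
  | cons a t ih =>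
    simp only [List.flatMap_cons, h a (by simp), ih (fun a ha => h a (by simp [ha]))]

-- stable descending insertion over elements whose keys lie in the strictly
-- descending score list S produces the concatenation of the score buckets
theorem foldl_insertBy_buckets (S : List Int) (hS : S.Pairwise (fun a b => b < a))
    (xs : List (String × Int)) (hxs : ∀ p ∈ xs, p.2 ∈ S) :
    xs.foldl (fun acc x =>
        PySem.List.insertBy (fun a b => decide (b.2 < a.2)) x acc) [] =
      S.flatMap (fun s => xs.filter (fun p => p.2 == s)) := by
  induction xs using List.reverseRecOn with
  | nil => simp
  | append_singleton xs x ih =>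
    rw [List.foldl_append]
    rw [ih (fun p hp => hxs p (by simp [hp]))]
    rw [List.foldl_cons, List.foldl_nil]
    obtain ⟨S1, S2, hsplit⟩ := List.append_of_mem (hxs x (by simp))
    subst hsplit
    have hpair := List.pairwise_append.mp hS
    have h1 : ∀ s ∈ S1, x.2 < s := fun s hs => hpair.2.2 s hs x.2 (by simp)
    have h2 : ∀ s ∈ S2, s < x.2 := fun s hs => (List.pairwise_cons.mp hpair.2.1).1 s hs
    have hbig : ∀ y ∈ (S1.flatMap (fun s => xs.filter (fun p => p.2 == s)))
        ++ xs.filter (fun p => p.2 == x.2), (decide (y.2 < x.2) : Bool) = false := by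
      intro y hy
      rcases List.mem_append.mp hy with hy | hy
      · obtain ⟨s, hs, hy⟩ := List.mem_flatMap.mp hy
        have hys : y.2 = s := by simpa using (List.mem_filter.mp hy).2
        have := h1 s hs
        simp [hys]; omega
      · have hyx : y.2 = x.2 := by simpa using (List.mem_filter.mp hy).2
        simp [hyx]
    have hsmall : ∀ y ∈ S2.flatMap (fun s => xs.filter (fun p => p.2 == s)),
        (decide (y.2 < x.2) : Bool) = true := by
      intro y hy
      obtain ⟨s, hs, hy⟩ := List.mem_flatMap.mp hy
      have hys : y.2 = s := by simpa using (List.mem_filter.mp hy).2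
      have := h2 s hs
      simp [hys]; omega
    rw [List.flatMap_append, List.flatMap_cons, ← List.append_assoc,
        insertBy_skip _ _ _ _ hbig, insertBy_front _ _ _ hsmall]
    rw [List.flatMap_append, List.flatMap_cons]
    have e1 : S1.flatMap (fun s => (xs ++ [x]).filter (fun p => p.2 == s)) =
        S1.flatMap (fun s => xs.filter (fun p => p.2 == s)) := by
      apply pv_flatMap_congr
      intro s hs
      have hne : (x.2 == s) = false := by
        simp only [beq_eq_false_iff_ne]; exact ne_of_lt (h1 s hs)
      simp [List.filter_append, hne]
    have e2 : S2.flatMap (fun s => (xs ++ [x]).filter (fun p => p.2 == s)) =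
        S2.flatMap (fun s => xs.filter (fun p => p.2 == s)) := by
      apply pv_flatMap_congr
      intro s hs
      have hne : (x.2 == s) = false := by
        simp only [beq_eq_false_iff_ne]; exact ne_of_gt (h2 s hs)
      simp [List.filter_append, hne]
    have e3 : (xs ++ [x]).filter (fun p => p.2 == x.2) =
        xs.filter (fun p => p.2 == x.2) ++ [x] := by
      simp [List.filter_append]
    rw [e1, e2, e3]
    simp

-- the score range 18..1 is strictly descending
theorem pyRange_desc : (PySem.List.pyRange 18 0 (-1)).Pairwise (fun a b => b < a) := by
  rw [PySem.List.pyRange_neg_one_eq_reverse]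
  rw [List.pairwise_reverse]
  exact PySem.List.pairwise_lt_pyRange_one 1 19

-- Python's stable descending sort of the scored lines equals the bucket concatenation
theorem sorted_eq_buckets (xs : List (String × Int)) (h : ∀ p ∈ xs, 0 < p.2 ∧ p.2 ≤ 18) :
    PySem.List.sorted xs (fun p => p.2) true =
      (PySem.List.pyRange 18 0 (-1)).flatMap (fun s => xs.filter (fun p => p.2 == s)) := by
  rw [PySem.List.sorted_rev_eq_foldl_insertBy]
  exact foldl_insertBy_buckets _ pyRange_desc xs
    (fun p hp => (PySem.List.mem_pyRange_neg_one).mpr ⟨(h p hp).1, (h p hp).2⟩)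

-- every pair the scoring loop emits has a score in 1..18
theorem scored_bound (f : String → Int) (hf : ∀ ln, f ln ≤ 18) :
    ∀ (ls : List String) (acc : List (String × Int)), (∀ p ∈ acc, 0 < p.2 ∧ p.2 ≤ 18) →
    ∀ p ∈ ls.foldl (pvStepA f) acc, 0 < p.2 ∧ p.2 ≤ 18 := by
  intro ls
  induction ls with
  | nil => intro acc h p hp; simpa using h p hp
  | cons ln t ih =>
    intro acc h p hp
    rw [List.foldl_cons] at hp
    refine ih _ ?_ p hp
    intro q hq
    unfold pvStepA at hq
    split_ifs at hq with h6 hpos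
    · exact h q hq
    · rcases List.mem_append.mp hq with hq | hq
      · exact h q hq
      · have hqe : q = (ln, f ln) := by simpa using hq
        subst hqe
        exact ⟨hpos, hf ln⟩
    · exact h q hq

-- A's per-line score is at most the number of (deduplicated) keywords
theorem scoreA_le (tk : List String) (ln : String) : pvScoreA tk ln ≤ (tk.length : Int) := by
  unfold pvScoreA
  rw [PySem.List.sum_map_ite_one_zero]
  exact_mod_cast List.countP_le_length

-- B's whole selection pipeline produces A's out-list
theorem sel_eq (raws tk : List String) (mw : Int) (htk : tk.length ≤ 18) :
    ((PySem.List.pyRange 18 0 (-1)).foldl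
        (fun st s => (((raws.foldl (pvStepB (pvScoreB tk)) (0, PySem.Dict.empty)).2).getD s
          []).foldl (pvSel mw) st) (([] : List String), (0 : Int), (0 : Int))).1 =
      ((PySem.List.slice (PySem.List.sorted
          ((PySem.List.slice ((raws.filter (fun ln => PySem.Str.strip ln != "")).map
              (fun ln => PySem.Str.strip ln)) none (some 120)).foldl
            (pvStepA (pvScoreA tk)) []) (fun p => p.2) true) none (some 6)).foldl
        (fun s p => pvBudget mw s p.1) (([] : List String), (0 : Int))).1 := by
  have hsc : pvScoreB tk = pvScoreA tk := funext (score_eq tk)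
  have hsl : PySem.List.slice ((raws.filter (fun ln => PySem.Str.strip ln != "")).map
      (fun ln => PySem.Str.strip ln)) none (some (120 : Int)) =
      ((raws.filter (fun ln => PySem.Str.strip ln != "")).map
        (fun ln => PySem.Str.strip ln)).take 120 := by
    rw [PySem.List.slice_to, show ((120 : Int)).toNat = 120 from rfl]
    norm_num
  rw [hsl]
  set scored := (((raws.filter (fun ln => PySem.Str.strip ln != "")).map
      (fun ln => PySem.Str.strip ln)).take 120).foldl (pvStepA (pvScoreA tk)) [] with hscored
  have hdict : ∀ s : Int, ((raws.foldl (pvStepB (pvScoreB tk)) (0, PySem.Dict.empty)).2).getD s []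
      = (scored.filter (fun p => p.2 == s)).map (fun p => p.1) := by
    intro s
    rw [hsc, fuse (pvScoreA tk) raws 0 _ le_rfl]
    have h120 : ((120 : Int) - 0).toNat = 120 := by omega
    rw [h120]
    exact dict_char _ _ _ [] (by intro s'; simp) s
  have hfun : (fun (st : List String × Int × Int) s =>
        (((raws.foldl (pvStepB (pvScoreB tk)) (0, PySem.Dict.empty)).2).getD s
          []).foldl (pvSel mw) st)
      = fun st s => ((scored.filter (fun p => p.2 == s)).map (fun p => p.1)).foldl
          (pvSel mw) st := by
    funext st s; rw [hdict s]
  rw [hfun, outer_flatten]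
  have hbound := scored_bound (pvScoreA tk)
      (fun ln => le_trans (scoreA_le tk ln) (by exact_mod_cast htk))
      (((raws.filter (fun ln => PySem.Str.strip ln != "")).map
        (fun ln => PySem.Str.strip ln)).take 120) [] (by simp)
  have hflat : (PySem.List.pyRange 18 0 (-1)).flatMap
      (fun s => (scored.filter (fun p => p.2 == s)).map (fun p => p.1))
      = (PySem.List.sorted scored (fun p => p.2) true).map (fun p => p.1) := by
    rw [sorted_eq_buckets scored hbound, List.map_flatMap]
  rw [hflat, capfuse mw _ [] 0 0 le_rfl]
  have h6 : ((6 : Int) - 0).toNat = 6 := by omega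
  rw [h6, ← List.map_take, List.foldl_map]
  rw [PySem.List.slice_to, show ((6 : Int)).toNat = 6 from rfl]
  norm_num

-- the two ports, written over the abstract loop bodies (each side is definitionally
-- equal to the corresponding port)
theorem final_eq (text : String) (keywords : List String) (mw : Int) :
    (let tkA := PySem.Set.ofList ((PySem.List.slice keywords none (some 18)).map
        (fun k => PySem.Str.lower k))
     let lines := (((PySem.Str.split? text "
").getD []).filter
        (fun ln => PySem.Str.strip ln != "")).map (fun ln => PySem.Str.strip ln)
     let scored := PySem.List.sorted ((PySem.List.slice lines none (some 120)).foldl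
        (pvStepA (pvScoreA tkA)) []) (fun p => p.2) true
     let res := (PySem.List.slice scored none (some 6)).foldl
        (fun s p => pvBudget mw s p.1) (([] : List String), (0 : Int))
     if res.1 ≠ [] then PySem.Str.join " " res.1
     else PySem.Str.join " " (PySem.List.slice (PySem.Str.split₀ text) none (some mw))) =
    (let tkB := (PySem.List.slice keywords none (some 18)).foldl
        (fun s k => PySem.Set.add s (PySem.Str.lower k)) []
     let res := (PySem.List.pyRange 18 0 (-1)).foldl (fun st s =>
        (((((PySem.Str.split? text "
").getD []).foldl (pvStepB (pvScoreB tkB))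
            ((0 : Int), PySem.Dict.empty)).2).getD s []).foldl (pvSel mw) st)
        (([] : List String), (0 : Int), (0 : Int))
     if res.1 ≠ [] then PySem.Str.join " " res.1
     else PySem.Str.join " " (PySem.List.slice (PySem.Str.split₀ text) none (some mw))) := by
  simp only [kws_eq]
  have htk : (PySem.Set.ofList ((PySem.List.slice keywords none (some 18)).map
      (fun k => PySem.Str.lower k))).length ≤ 18 := by
    calc (PySem.Set.ofList ((PySem.List.slice keywords none (some 18)).map
          (fun k => PySem.Str.lower k))).length
        ≤ ((PySem.List.slice keywords none (some 18)).map
          (fun k => PySem.Str.lower k)).length := PySem.Set.length_ofList_le _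
      _ = (PySem.List.slice keywords none (some 18)).length := List.length_map ..
      _ ≤ 18 := by
          rw [PySem.List.slice_to]
          · exact le_trans (List.length_take_le _ _) (by norm_num)
          · norm_num
  have h := sel_eq ((PySem.Str.split? text "
").getD [])
      (PySem.Set.ofList ((PySem.List.slice keywords none (some 18)).map
        (fun k => PySem.Str.lower k))) mw htk
  rw [← h]

-- ===== VERDICT (by name: the statement is the Claim_ definition above) =====
theorem summary_spec : Claim_equal_summary := by
  intro text keywords mw _
  show summary text keywords mw = summary_alt text keywords mw
  exact final_eq text keywords mw
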